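-- pv_equiv track=rewrite | github.com/putssander/picture4d-danish | scripts/pymusas_translate/wiktionary_lookup.py | parse_first_english_definition
-- ===== SOURCE A (Python) =====
-- from typing import Optional, Tuple
--
-- def parse_first_english_definition(wikitext: str) -> Optional[str]:
--     """Extract first `#` bullet in the English section."""
--     lines = wikitext.split("\n")
--     in_english = False
--     for ln in lines:
--         if ln.startswith("==") and "English" in ln:
--             in_english = True
--             continue
--         if in_english and ln.startswith("=="):
--             break
--         if in_english and ln.lstrip().startswith("#"):
--             return f"wiktionary: {ln.lstrip('#').strip()}"
--     for ln in lines: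
--         if ln.lstrip().startswith("#"):
--             return f"wiktionary: {ln.lstrip('#').strip()}"
--     return None
-- ===== SOURCE B (Python) =====
-- def parse_first_english_definition(wikitext):
--     """Extract first `#` bullet in the English section (region-first decomposition)."""
--     lines = wikitext.split("\n")
--
--     def fmt(ln):
--         return f"wiktionary: {ln.lstrip('#').strip()}"
--
--     def first_bullet(ls):
--         for ln in ls:
--             if ln.lstrip().startswith("#"):
--                 return fmt(ln)
--         return None
--
--     # Collect the English-section region: lines after the first '=='-header
--     # containing 'English', up to (exclusive) the first '==' line lacking
--     # 'English'; '==' lines containing 'English' are skipped, not boundaries.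
--     region = []
--     i = 0
--     n = len(lines)
--     while i < n and not (lines[i].startswith("==") and "English" in lines[i]):
--         i += 1
--     i += 1
--     while i < n:
--         ln = lines[i]
--         if ln.startswith("=="):
--             if "English" not in ln:
--                 break
--         else:
--             region.append(ln)
--         i += 1
--
--     return first_bullet(region) or first_bullet(lines)
-- ===== Notes on version B (the rewrite author's own statement) =====
-- stated objective: simpler
-- what changed: Replaces the stateful in_english-flag loop with a two-phase decomposition: first compute the English-section region as a sublist (skip to the English header, collect lines until a non-English '==' boundary), then reuse one first-bullet scan on the region and, failing that, on all lines.
import Mathlib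
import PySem

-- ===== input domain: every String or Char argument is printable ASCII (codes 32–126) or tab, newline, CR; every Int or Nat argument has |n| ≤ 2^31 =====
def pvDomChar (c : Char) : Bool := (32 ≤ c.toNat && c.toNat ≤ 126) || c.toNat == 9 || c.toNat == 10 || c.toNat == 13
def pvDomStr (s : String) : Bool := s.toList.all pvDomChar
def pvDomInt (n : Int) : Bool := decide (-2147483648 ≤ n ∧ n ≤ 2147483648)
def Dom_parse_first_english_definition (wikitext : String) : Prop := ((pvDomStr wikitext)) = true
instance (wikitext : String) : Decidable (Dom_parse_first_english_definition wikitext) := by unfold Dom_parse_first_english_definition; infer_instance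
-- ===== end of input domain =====

-- B changes the decomposition only (region-first, shared bullet scan); same value everywhere, same cost.

-- ===== PORT A =====
-- ln.lstrip('#') : hand-ported as dropWhile (· == '#') — exact: lstrip with a one-char set drops exactly the leading '#'s
def pfedFmtA (ln : List Char) : String :=
  "wiktionary: " ++ String.ofList (PySem.Chars.strip (ln.dropWhile (· == '#')))

-- the first for-loop of A, carrying the in_english flag; `break` yields none
def pfedLoopA : List (List Char) → Bool → Option String
  | [], _ => none
  | ln :: rest, inEng =>
    if PySem.Chars.startswith ln "==".toList && PySem.Chars.isIn "English".toList ln then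
      pfedLoopA rest true
    else if inEng && PySem.Chars.startswith ln "==".toList then
      none
    else if inEng && PySem.Chars.startswith (PySem.Chars.lstrip ln) "#".toList then
      some (pfedFmtA ln)
    else
      pfedLoopA rest inEng

-- the second (fallback) for-loop of A
def pfedFallA : List (List Char) → Option String
  | [] => none
  | ln :: rest =>
    if PySem.Chars.startswith (PySem.Chars.lstrip ln) "#".toList then some (pfedFmtA ln)
    else pfedFallA rest

def parse_first_english_definition (wikitext : String) : Option String :=
  let lines := PySem.Chars.splitOn wikitext.toList "\n".toList
  match pfedLoopA lines false with
  | some r => some r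
  | none => pfedFallA lines

-- ===== PORT B =====
def pfedFmtB (ln : List Char) : String :=
  "wiktionary: " ++ String.ofList (PySem.Chars.strip (ln.dropWhile (· == '#')))

-- first_bullet: first line whose lstrip starts with '#'
def pfedFirstBullet : List (List Char) → Option String
  | [] => none
  | ln :: rest =>
    if PySem.Chars.startswith (PySem.Chars.lstrip ln) "#".toList then some (pfedFmtB ln)
    else pfedFirstBullet rest

-- skip to just after the first '==' header containing 'English' (none if absent)
def pfedAfterHeader : List (List Char) → Option (List (List Char))
  | [] => none
  | ln :: rest =>
    if PySem.Chars.startswith ln "==".toList && PySem.Chars.isIn "English".toList ln then some rest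
    else pfedAfterHeader rest

-- collect the region: stop at a '==' line lacking 'English'; skip '==' lines containing it
def pfedCollect : List (List Char) → List (List Char)
  | [] => []
  | ln :: rest =>
    if PySem.Chars.startswith ln "==".toList then
      if PySem.Chars.isIn "English".toList ln then pfedCollect rest else []
    else ln :: pfedCollect rest

def parse_first_english_definition_alt (wikitext : String) : Option String :=
  let lines := PySem.Chars.splitOn wikitext.toList "\n".toList
  let region := match pfedAfterHeader lines with
    | none => []
    | some rest => pfedCollect rest
  match pfedFirstBullet region with
  | some r => some r
  | none => pfedFirstBullet lines

-- ===== PRECONDITION & SPEC =====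
def Spec_parse_first_english_definition (wikitext : String) (out : Option String) : Prop := out = parse_first_english_definition_alt wikitext
instance (wikitext : String) (out : Option String) : Decidable (Spec_parse_first_english_definition wikitext out) := by unfold Spec_parse_first_english_definition; infer_instance

-- ===== CLAIM (what is proved, stated in full; the proofs are below) =====
def Claim_equal_parse_first_english_definition : Prop := ∀ (wikitext : String), Dom_parse_first_english_definition wikitext → Spec_parse_first_english_definition wikitext (parse_first_english_definition wikitext)

-- ===== LEMMAS AND PROOFS =====

theorem pfedFall_eq_firstBullet (ls : List (List Char)) : pfedFallA ls = pfedFirstBullet ls := by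
  induction ls with
  | nil => rfl
  | cons ln rest ih => simp [pfedFallA, pfedFirstBullet, pfedFmtA, pfedFmtB, ih]

-- A's loop with the flag set equals the bullet scan of the collected region
theorem pfedLoopA_true (ls : List (List Char)) :
    pfedLoopA ls true = pfedFirstBullet (pfedCollect ls) := by
  induction ls with
  | nil => rfl
  | cons ln rest ih =>
    simp only [pfedLoopA, pfedCollect, Bool.and_eq_true, ih]
    split_ifs <;> simp_all [pfedFirstBullet, pfedFmtA, pfedFmtB]

-- A's loop with the flag unset scans for the header, then behaves as above
theorem pfedLoopA_false (ls : List (List Char)) :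
    pfedLoopA ls false =
      match pfedAfterHeader ls with
      | none => none
      | some rest => pfedLoopA rest true := by
  induction ls with
  | nil => rfl
  | cons ln rest ih =>
    simp only [pfedLoopA, pfedAfterHeader, Bool.and_eq_true, Bool.false_eq_true, false_and,
      if_false, ih]
    split_ifs <;> rfl

-- ===== VERDICT (by name: the statement is the Claim_ definition above) =====
theorem parse_first_english_definition_spec : Claim_equal_parse_first_english_definition := by
  intro w _
  unfold Spec_parse_first_english_definition
  simp only [parse_first_english_definition, parse_first_english_definition_alt, pfedLoopA_false]
  cases h : pfedAfterHeader (PySem.Chars.splitOn w.toList "\n".toList) with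
  | none => simp [pfedFirstBullet, pfedFall_eq_firstBullet]
  | some rest =>
    simp only [pfedLoopA_true]
    cases pfedFirstBullet (pfedCollect rest) <;> simp [pfedFall_eq_firstBullet]
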